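-- pv_equiv track=rewrite | github.com/nhannt201/100AlgorithmsChallenge_PyThon | 16.arrayConversion.py | arrayRecursive
-- ===== SOURCE A (Python) =====
-- def arrLe(arr):
--     new_arr = []
--     for x in range(len(arr)-1):
--          if x % 2 == 0:
--             new_arr.append(arr[x] + arr[x+1])
--     return new_arr
--
-- def arrChan(arr):
--     arr_rs = []
--     for y in range(len(arr)-1):
--         if y % 2 == 0:
--            arr_rs.append(arr[y] * arr[y+1])
--     return arr_rs
--
-- def arrayRecursive(inputArray, state):
--     if (len(inputArray)) == 1:
--         return inputArray[0]
--     else: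
--         if state:
--             return arrayRecursive(arrLe(inputArray), False)
--         else:
--             return arrayRecursive(arrChan(inputArray), True)
-- ===== SOURCE B (Python) =====
-- def arrayRecursive(inputArray, state):
--     arr = inputArray
--     while len(arr) != 1:
--         it = iter(arr)
--         pairs = list(zip(it, it))  # adjacent disjoint pairs; a trailing odd element is dropped
--         arr = [a + b if state else a * b for a, b in pairs]
--         state = not state
--     return arr[0]
-- ===== Notes on version B (the rewrite author's own statement) =====
-- stated objective: simpler
-- what changed: The recursion with its two index-loop helpers arrLe/arrChan (range(len-1) with an x%2==0 test) is replaced by a single while loop that pairs adjacent elements via zip(it, it) and maps add or multiply over the pairs, toggling the flag each level.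
-- outside the precondition, e.g. on arrayRecursive([], True): A raises RecursionError, B does not finish within the time limit
import Mathlib
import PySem

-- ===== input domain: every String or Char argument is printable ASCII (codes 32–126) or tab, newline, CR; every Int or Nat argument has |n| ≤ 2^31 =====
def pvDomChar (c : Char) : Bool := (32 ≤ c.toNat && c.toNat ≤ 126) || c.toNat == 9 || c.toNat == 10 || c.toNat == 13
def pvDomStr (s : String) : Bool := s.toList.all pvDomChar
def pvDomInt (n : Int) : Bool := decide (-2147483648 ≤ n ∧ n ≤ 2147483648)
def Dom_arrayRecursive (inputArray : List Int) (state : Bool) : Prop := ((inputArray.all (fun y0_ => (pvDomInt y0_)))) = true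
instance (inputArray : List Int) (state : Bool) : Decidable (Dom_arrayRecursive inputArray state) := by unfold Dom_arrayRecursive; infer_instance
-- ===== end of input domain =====

-- B fuses A's two index-loop helpers into one zip-of-an-iterator pairing step and
-- replaces the outer recursion by a flag-toggling while loop (objective: simpler).

-- ===== PORT A =====
-- arrLe: for x in range(len(arr)-1): if x % 2 == 0: new_arr.append(arr[x] + arr[x+1])
def arrLeP (arr : List Int) : List Int :=
  (PySem.List.pyRange 0 ((arr.length : Int) - 1) 1).foldl
    (fun new_arr x =>
      if PySem.Int.mod x 2 == 0 then
        new_arr ++ [PySem.List.pyGetD arr x 0 + PySem.List.pyGetD arr (x + 1) 0]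
      else new_arr) []

-- arrChan: for y in range(len(arr)-1): if y % 2 == 0: arr_rs.append(arr[y] * arr[y+1])
def arrChanP (arr : List Int) : List Int :=
  (PySem.List.pyRange 0 ((arr.length : Int) - 1) 1).foldl
    (fun arr_rs y =>
      if PySem.Int.mod y 2 == 0 then
        arr_rs ++ [PySem.List.pyGetD arr y 0 * PySem.List.pyGetD arr (y + 1) 0]
      else arr_rs) []

-- A's recursion, made total with a fuel counter; the fuel case is never reached when
-- inputArray ≠ [] (each step strictly shrinks the list), and A raises on [] (outside Pre_).
def arrayRecursiveF : Nat → List Int → Bool → Int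
  | 0, arr, _ => PySem.List.pyGetD arr 0 0
  | fuel + 1, arr, state =>
    if arr.length == 1 then PySem.List.pyGetD arr 0 0
    else if state then arrayRecursiveF fuel (arrLeP arr) false
    else arrayRecursiveF fuel (arrChanP arr) true

def arrayRecursive (inputArray : List Int) (state : Bool) : Int :=
  arrayRecursiveF inputArray.length inputArray state

-- ===== PORT B =====
-- list(zip(it, it)) on it = iter(arr): the adjacent disjoint pairs (exact: zip on two
-- copies of one iterator pairs consecutive elements and drops a trailing odd element)
def pairsOf : List Int → List (Int × Int)
  | a :: b :: rest => (a, b) :: pairsOf rest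
  | _ => []

-- [a + b if state else a * b for a, b in pairs]
def altStep (arr : List Int) (state : Bool) : List Int :=
  (pairsOf arr).map (fun p => if state then p.1 + p.2 else p.1 * p.2)

-- the while loop, made total with a fuel counter (never exhausted when inputArray ≠ [])
def altLoop : Nat → List Int → Bool → Int
  | 0, arr, _ => PySem.List.pyGetD arr 0 0
  | fuel + 1, arr, state =>
    if arr.length == 1 then PySem.List.pyGetD arr 0 0
    else altLoop fuel (altStep arr state) (!state)

def arrayRecursive_alt (inputArray : List Int) (state : Bool) : Int :=
  altLoop inputArray.length inputArray state

-- ===== PRECONDITION & SPEC =====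
-- Pre_ excludes only the empty list, on which Python A raises RecursionError.
def Pre_arrayRecursive (inputArray : List Int) (state : Bool) : Prop := inputArray ≠ []
instance (inputArray : List Int) (state : Bool) : Decidable (Pre_arrayRecursive inputArray state) := by
  unfold Pre_arrayRecursive; infer_instance

def pvWitness_arrayRecursive : List Int × Bool := ([1, 2, 3], true)

def Spec_arrayRecursive (inputArray : List Int) (state : Bool) (out : Int) : Prop := out = arrayRecursive_alt inputArray state
instance (inputArray : List Int) (state : Bool) (out : Int) : Decidable (Spec_arrayRecursive inputArray state out) := by unfold Spec_arrayRecursive; infer_instance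

-- ===== CLAIM (what is proved, stated in full; the proofs are below) =====
def Claim_equal_arrayRecursive : Prop := ∀ (inputArray : List Int) (state : Bool), Dom_arrayRecursive inputArray state → Pre_arrayRecursive inputArray state → Spec_arrayRecursive inputArray state (arrayRecursive inputArray state)

-- ===== LEMMAS AND PROOFS =====

-- proof-side helper: the pair fold with an abstract combining operation
def pairFold (f : Int → Int → Int) : List Int → List Int
  | a :: b :: rest => f a b :: pairFold f rest
  | _ => []

theorem range_add_two (n : Nat) :
    List.range (n + 2) = 0 :: 1 :: (List.range n).map (· + 2) := by
  rw [List.range_succ_eq_map, List.range_succ_eq_map]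
  simp [Function.comp_def, Nat.succ_eq_add_one]

-- the even indices of range(len-1), read in adjacent pairs, ARE the pair fold
theorem natForm (f : Int → Int → Int) : ∀ (arr : List Int),
    ((List.range (arr.length - 1)).filter (fun k => k % 2 == 0)).map
      (fun k => f (arr.getD k 0) (arr.getD (k+1) 0)) = pairFold f arr
  | [] => by simp [pairFold]
  | [a] => by simp [pairFold]
  | a :: b :: [] => by simp [pairFold, List.range_succ]
  | a :: b :: c :: rest => by
    have ih := natForm f (c :: rest)
    simp only [List.length_cons, Nat.add_sub_cancel] at ih ⊢
    rw [show rest.length + 1 + 1 = rest.length + 2 from rfl, range_add_two]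
    simp only [List.filter_cons, List.filter_map]
    norm_num
    rw [pairFold, ← ih]
    simp [Function.comp_def, List.getD_eq_getElem?_getD,
      show ∀ x:Nat, x+2 = (x+1)+1 from fun x => rfl, List.getElem?_cons_succ,
      show ∀ x:Nat, (x+1+1) % 2 = x % 2 from fun x => by omega]

-- A's filtered index loop computes the pair fold, for any combining operation
theorem foldForm (f : Int → Int → Int) (arr : List Int) :
    (PySem.List.pyRange 0 ((arr.length : Int) - 1) 1).foldl
      (fun acc x => if PySem.Int.mod x 2 == 0 then
          acc ++ [f (PySem.List.pyGetD arr x 0) (PySem.List.pyGetD arr (x + 1) 0)]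
        else acc) []
    = pairFold f arr := by
  rw [PySem.List.foldl_append_if, PySem.List.pyRange_one, ← natForm f arr]
  rw [show (((arr.length : Int) - 1) - 0).toNat = arr.length - 1 by omega]
  simp [List.filter_map, Function.comp_def, List.getD_eq_getElem?_getD]
  congr 1
  · funext x
    rw [show ((x:Int) + 1) = ((x+1 : Nat) : Int) by push_cast; ring,
      PySem.List.pyGetD_natCast, List.getD_eq_getElem?_getD]
  · apply List.filter_congr
    intro x _
    simp
    omega

theorem altStep_eq_pairFold (add : Bool) :
    ∀ (arr : List Int), altStep arr add = pairFold (fun a b => if add then a + b else a * b) arr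
  | [] => rfl
  | [_] => rfl
  | a :: b :: rest => by
    simp only [altStep, pairsOf, List.map_cons, pairFold]
    exact congrArg (List.cons _) (altStep_eq_pairFold add rest)

theorem arrLeP_eq (arr : List Int) : arrLeP arr = altStep arr true := by
  unfold arrLeP
  rw [altStep_eq_pairFold]
  exact foldForm (· + ·) arr

theorem arrChanP_eq (arr : List Int) : arrChanP arr = altStep arr false := by
  unfold arrChanP
  rw [altStep_eq_pairFold]
  exact foldForm (· * ·) arr

theorem loops_eq : ∀ (fuel : Nat) (arr : List Int) (state : Bool),
    arrayRecursiveF fuel arr state = altLoop fuel arr state := by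
  intro fuel
  induction fuel with
  | zero => intro arr state; rfl
  | succ n ih =>
    intro arr state
    simp only [arrayRecursiveF, altLoop]
    by_cases h : arr.length == 1
    · simp [h]
    · simp only [h]
      cases state with
      | true => simpa [arrLeP_eq] using ih (arrLeP arr) false
      | false => simpa [arrChanP_eq] using ih (arrChanP arr) true

-- ===== VERDICT (by name: the statement is the Claim_ definition above) =====
theorem arrayRecursive_spec : Claim_equal_arrayRecursive := by
  intro inputArray state _ _
  unfold Spec_arrayRecursive arrayRecursive arrayRecursive_alt
  exact loops_eq _ _ _
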